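-- pv_equiv track=rewrite | github.com/ecardona506/Competitive-programing | Setting Problems.py | solve
-- ===== SOURCE A (Python) =====
-- def solve(S,G):
-- 	tmp = list()
-- 	n = len(G)
-- 	for i in range(n):
-- 		tmp.append((S[i],G[i]))
-- 	left,right = list(),list()
-- 	for i in range(n):
-- 		if tmp[i][0] <= tmp[i][1]: left.append(tmp[i])
-- 		else: right.append(tmp[i])
-- 	left.sort(),right.sort(key = lambda x:x[1])
-- 	accum_left,accum_right = 0,0
-- 	m,p = len(left),len(right)
-- 	for i in range(m):
-- 		accum_left += left[i][0]
-- 		if accum_left >= accum_right: accum_right = accum_left + left[i][1]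
-- 		else: accum_right += left[i][1]
-- 	for i in range(p-1,-1,-1):
-- 		accum_left += right[i][0]
-- 		if accum_left >= accum_right: accum_right = accum_left + right[i][1]
-- 		else: accum_right += right[i][1]
-- 	return max(accum_left,accum_right)
-- ===== SOURCE B (Python) =====
-- def solve(S, G):
--     pairs = [(S[i], G[i]) for i in range(len(G))]
--     left = sorted(p for p in pairs if p[0] <= p[1])
--     right = sorted((p for p in pairs if p[0] > p[1]), key=lambda x: x[1])
--     # A's schedule is left + reversed(right); walk it BACKWARDS and take the
--     # closed-form maximum over critical start positions: for each suffix,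
--     # candidate = (prefix sum of S before it) + (sum of G over it).
--     pref = sum(s for s, _ in pairs)
--     best, suff = pref, 0
--     for s, g in right + left[::-1]:
--         suff += g
--         best = max(best, pref + suff)
--         pref -= s
--     return max(best, suff)
-- ===== Notes on version B (the rewrite author's own statement) =====
-- stated objective: alternative
-- what changed: B keeps A's schedule construction but replaces A's forward greedy simulation (two index loops maintaining running finish time via if/else) with a single backward sweep that computes the closed-form answer max over start positions of (prefix sum of S) + (suffix sum of G), maintaining prefix/suffix accumulators.
import Mathlib
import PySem

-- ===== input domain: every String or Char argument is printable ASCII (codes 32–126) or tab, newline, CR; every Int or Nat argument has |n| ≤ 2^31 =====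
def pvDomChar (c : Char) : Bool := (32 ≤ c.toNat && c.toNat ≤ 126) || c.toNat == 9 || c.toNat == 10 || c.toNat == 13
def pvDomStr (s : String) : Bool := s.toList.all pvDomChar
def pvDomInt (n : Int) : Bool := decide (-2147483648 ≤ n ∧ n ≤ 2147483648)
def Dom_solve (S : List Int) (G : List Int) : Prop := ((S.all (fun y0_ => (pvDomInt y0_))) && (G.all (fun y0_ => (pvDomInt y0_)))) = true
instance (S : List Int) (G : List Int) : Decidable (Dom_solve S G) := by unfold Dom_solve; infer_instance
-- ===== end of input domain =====

-- B replaces A's forward greedy simulation (two index loops with an if/else completion-time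
-- recurrence) by a backward sweep over the schedule computing the closed-form maximum of
-- prefix-S-sum + suffix-G-sum over all start positions (objective: alternative).

-- ===== PORT A =====
def solve (S : List Int) (G : List Int) : Int :=
  let n : Int := PySem.List.len G
  let tmp : List (Int × Int) :=
    (PySem.List.pyRange 0 n 1).foldl
      (fun acc i => acc ++ [(PySem.List.pyGetD S i 0, PySem.List.pyGetD G i 0)]) []
  let lr : List (Int × Int) × List (Int × Int) :=
    (PySem.List.pyRange 0 n 1).foldl
      (fun acc i =>
        let t := PySem.List.pyGetD tmp i (0, 0)
        if t.1 ≤ t.2 then (acc.1 ++ [t], acc.2) else (acc.1, acc.2 ++ [t])) ([], [])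
  let left := PySem.List.sorted2 lr.1 (fun x => x.1) (fun x => x.2)
  let right := PySem.List.sorted lr.2 (fun x => x.2)
  let st1 : Int × Int := left.foldl
    (fun acc x =>
      let a := acc.1 + x.1
      (a, if a ≥ acc.2 then a + x.2 else acc.2 + x.2)) (0, 0)
  let st2 : Int × Int := (PySem.List.pyRange (PySem.List.len right - 1) (-1) (-1)).foldl
    (fun acc i =>
      let x := PySem.List.pyGetD right i (0, 0)
      let a := acc.1 + x.1
      (a, if a ≥ acc.2 then a + x.2 else acc.2 + x.2)) st1
  max st2.1 st2.2

-- ===== PORT B =====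
def solve_alt (S : List Int) (G : List Int) : Int :=
  let pairs : List (Int × Int) :=
    (PySem.List.pyRange 0 (PySem.List.len G) 1).map
      (fun i => (PySem.List.pyGetD S i 0, PySem.List.pyGetD G i 0))
  let left := PySem.List.sorted2 (pairs.filter fun p => p.1 ≤ p.2) (fun x => x.1) (fun x => x.2)
  let right := PySem.List.sorted (pairs.filter fun p => p.2 < p.1) (fun x => x.2)
  let pref0 := (pairs.map (fun p => p.1)).sum
  let st : Int × Int × Int :=
    (right ++ left.reverse).foldl
      (fun acc x => (max acc.1 (acc.2.1 + (acc.2.2 + x.2)), acc.2.1 - x.1, acc.2.2 + x.2))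
      (pref0, pref0, 0)
  max st.1 st.2.2

-- ===== PRECONDITION & SPEC =====
-- Pre_ excludes exactly the inputs where A raises IndexError (S shorter than G); B raises there too.
def Pre_solve (S : List Int) (G : List Int) : Prop := G.length ≤ S.length
instance (S : List Int) (G : List Int) : Decidable (Pre_solve S G) := by unfold Pre_solve; infer_instance
def pvWitness_solve : List Int × List Int := ([3, 1], [2, 4])

def Spec_solve (S : List Int) (G : List Int) (out : Int) : Prop := out = solve_alt S G
instance (S : List Int) (G : List Int) (out : Int) : Decidable (Spec_solve S G out) := by unfold Spec_solve; infer_instance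

-- ===== CLAIM (what is proved, stated in full; the proofs are below) =====
def Claim_equal_solve : Prop := ∀ (S : List Int) (G : List Int), Dom_solve S G → Pre_solve S G → Spec_solve S G (solve S G)

-- ===== LEMMAS AND PROOFS =====

-- the pair list [(S[i], G[i]) for i in range(len(G))] is zip S G (when S is long enough)
lemma pairs_eq_zip (S G : List Int) (h : G.length ≤ S.length) :
    (PySem.List.pyRange 0 (PySem.List.len G) 1).map
      (fun i => (PySem.List.pyGetD S i 0, PySem.List.pyGetD G i 0))
    = S.zip G := by
  apply List.ext_getElem
  · simp only [List.length_map, PySem.List.length_pyRange_one, PySem.List.len, List.length_zip]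
    omega
  · intro j h1 h2
    have hjG : j < G.length := by
      simp only [List.length_map, PySem.List.length_pyRange_one, PySem.List.len] at h1
      omega
    have hjS : j < S.length := lt_of_lt_of_le hjG h
    simp only [List.getElem_map, List.getElem_zip]
    rw [PySem.List.getElem_pyRange_one]
    rw [show ((0 : Int) + (j : Int)) = ((j : Nat) : Int) by ring]
    rw [PySem.List.pyGetD_natCast, PySem.List.pyGetD_natCast,
        List.getD_eq_getElem S 0 hjS, List.getD_eq_getElem G 0 hjG]

-- A's first loop builds exactly zip S G (when S is long enough).
lemma tmp_eq_zip (S G : List Int) (h : G.length ≤ S.length) :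
    (PySem.List.pyRange 0 (PySem.List.len G) 1).foldl
      (fun acc i => acc ++ [(PySem.List.pyGetD S i 0, PySem.List.pyGetD G i 0)]) []
    = S.zip G := by
  rw [PySem.List.foldl_append_singleton_eq_map, List.nil_append]
  exact pairs_eq_zip S G h

-- the partition loop, over the list itself
lemma partition_foldl (l : List (Int × Int)) (l0 r0 : List (Int × Int)) :
    l.foldl (fun (acc : List (Int × Int) × List (Int × Int)) t =>
        if t.1 ≤ t.2 then (acc.1 ++ [t], acc.2) else (acc.1, acc.2 ++ [t])) (l0, r0)
    = (l0 ++ l.filter (fun t => t.1 ≤ t.2), r0 ++ l.filter (fun t => t.2 < t.1)) := by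
  induction l generalizing l0 r0 with
  | nil => simp
  | cons x xs ih =>
    by_cases hx : x.1 ≤ x.2
    · simp [hx, ih, Int.not_lt.mpr hx]
    · simp [hx, ih, Int.not_le.mp hx]

-- the if/else accumulation is the max-recurrence
lemma step_eq :
    (fun (acc : Int × Int) (x : Int × Int) =>
      let a := acc.1 + x.1
      (a, if a ≥ acc.2 then a + x.2 else acc.2 + x.2))
    = (fun (acc : Int × Int) (x : Int × Int) => (acc.1 + x.1, max (acc.1 + x.1) acc.2 + x.2)) := by
  funext acc x
  by_cases h : acc.1 + x.1 ≥ acc.2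
  · simp only [if_pos h]
    rw [max_eq_left h]
  · simp only [if_neg h]
    rw [max_eq_right (le_of_not_ge h)]

-- A's backward index loop over 'right' is a fold over right.reverse
lemma countdown_foldl (xs : List (Int × Int)) (init : Int × Int) :
    (PySem.List.pyRange (PySem.List.len xs - 1) (-1) (-1)).foldl
      (fun acc i =>
        (acc.1 + (PySem.List.pyGetD xs i (0, 0)).1,
         if acc.1 + (PySem.List.pyGetD xs i (0, 0)).1 ≥ acc.2
         then acc.1 + (PySem.List.pyGetD xs i (0, 0)).1 + (PySem.List.pyGetD xs i (0, 0)).2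
         else acc.2 + (PySem.List.pyGetD xs i (0, 0)).2)) init
    = xs.reverse.foldl (fun acc x =>
        (acc.1 + x.1, if acc.1 + x.1 ≥ acc.2 then acc.1 + x.1 + x.2 else acc.2 + x.2)) init := by
  have h1 : PySem.List.pyRange (PySem.List.len xs - 1) (-1) (-1)
      = (PySem.List.pyRange 0 (PySem.List.len xs) 1).reverse := by
    rw [PySem.List.pyRange_neg_one_eq_reverse]
    norm_num
  rw [h1,
      ← List.foldl_map (f := fun i => PySem.List.pyGetD xs i (0, 0))
        (g := fun (acc : Int × Int) (x : Int × Int) =>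
          (acc.1 + x.1, if acc.1 + x.1 ≥ acc.2 then acc.1 + x.1 + x.2 else acc.2 + x.2)),
      List.map_reverse, PySem.List.map_pyGetD_pyRange_zero]

-- the closed-form "best start position" value: Esched a l = max over i of
-- (a + sum of S over the first i elements + sum of G from element i on), incl. i = length
def Esched : Int → List (Int × Int) → Int
  | a, [] => a
  | a, x :: xs => max (a + x.1 + (x.2 + (xs.map Prod.snd).sum)) (Esched (a + x.1) xs)

-- A's greedy fold computes the closed form
lemma ansA (l : List (Int × Int)) : ∀ a b : Int,
    max (l.foldl (fun (acc : Int × Int) x => (acc.1 + x.1, max (acc.1 + x.1) acc.2 + x.2)) (a, b)).1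
        (l.foldl (fun (acc : Int × Int) x => (acc.1 + x.1, max (acc.1 + x.1) acc.2 + x.2)) (a, b)).2
    = max (b + (l.map Prod.snd).sum) (Esched a l) := by
  induction l with
  | nil => intro a b; simp [Esched, max_comm]
  | cons x xs ih =>
    intro a b
    simp only [List.foldl_cons, List.map_cons, List.sum_cons, Esched]
    rw [ih]
    rcases le_total (a + x.1) b with h | h <;>
      rcases le_total ((a + x.1) + x.2 + (xs.map Prod.snd).sum) (b + (x.2 + (xs.map Prod.snd).sum)) with h2 | h2 <;>
      omega

-- B's backward sweep computes the same closed form (as a foldr over the schedule)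
lemma ansB (l : List (Int × Int)) : ∀ a : Int,
    l.foldr (fun x (acc : Int × Int × Int) =>
        (max acc.1 (acc.2.1 + (acc.2.2 + x.2)), acc.2.1 - x.1, acc.2.2 + x.2))
      (a + (l.map Prod.fst).sum, a + (l.map Prod.fst).sum, 0)
    = (Esched a l, a, (l.map Prod.snd).sum) := by
  induction l with
  | nil => intro a; simp [Esched]
  | cons x xs ih =>
    intro a
    simp only [List.foldr_cons, List.map_cons, List.sum_cons]
    rw [show a + (x.1 + (xs.map Prod.fst).sum) = (a + x.1) + (xs.map Prod.fst).sum by ring, ih]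
    simp only [Esched, Prod.mk.injEq]
    refine ⟨by rw [max_comm]; ring_nf, by ring, by ring⟩

-- the schedule is a permutation of the pair list
lemma perm_sched (pairs : List (Int × Int)) :
    (PySem.List.sorted2 (pairs.filter fun p => p.1 ≤ p.2) (fun x => x.1) (fun x => x.2)
     ++ (PySem.List.sorted (pairs.filter fun p => p.2 < p.1) (fun x => x.2)).reverse).Perm pairs := by
  have hf : pairs.filter (fun p => p.2 < p.1) = pairs.filter (fun p => !(decide (p.1 ≤ p.2))) := by
    apply List.filter_congr
    intro x _
    by_cases h : x.1 ≤ x.2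
    · simp [h, not_lt.mpr h]
    · simp [h, not_le.mp h]
  refine (List.Perm.append (PySem.List.sorted2_perm _ _ _ _)
      ((List.reverse_perm _).trans (PySem.List.sorted_perm _ _ _))).trans ?_
  rw [hf]
  exact List.filter_append_perm _ pairs

-- ===== VERDICT (by name: the statement is the Claim_ definition above) =====
theorem solve_spec : Claim_equal_solve := by
  intro S G _ hpre
  unfold Pre_solve at hpre
  unfold Spec_solve solve solve_alt
  simp only []
  rw [tmp_eq_zip S G hpre, pairs_eq_zip S G hpre]
  have hlen : PySem.List.len G = PySem.List.len (S.zip G) := by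
    simp only [PySem.List.len, List.length_zip]
    omega
  rw [hlen, PySem.List.foldl_pyRange_zero_pyGetD (S.zip G) (0, 0)
        (fun (acc : List (Int × Int) × List (Int × Int)) t =>
          if t.1 ≤ t.2 then (acc.1 ++ [t], acc.2) else (acc.1, acc.2 ++ [t])) ([], []),
      partition_foldl]
  simp only [List.nil_append]
  set pairs := S.zip G with hp
  set left := PySem.List.sorted2 (pairs.filter fun p => p.1 ≤ p.2) (fun x => x.1) (fun x => x.2) with hl
  set right := PySem.List.sorted (pairs.filter fun p => p.2 < p.1) (fun x => x.2) with hr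
  -- A side
  rw [countdown_foldl, step_eq, ← List.foldl_append]
  -- B side: its loop list is the reverse of A's schedule
  have hrev : right ++ left.reverse = (left ++ right.reverse).reverse := by
    rw [List.reverse_append, List.reverse_reverse]
  have hsum : (pairs.map (fun p => p.1)).sum = ((left ++ right.reverse).map Prod.fst).sum := by
    exact (List.Perm.sum_eq (List.Perm.map Prod.fst (perm_sched pairs))).symm
  rw [hrev, List.foldl_reverse, hsum]
  have h0 : ((left ++ right.reverse).map Prod.fst).sum
      = 0 + ((left ++ right.reverse).map Prod.fst).sum := by ring
  rw [h0, ansB (left ++ right.reverse) 0, ansA (left ++ right.reverse) 0 0]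
  simp [max_comm]
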